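-- pv_equiv track=rewrite | github.com/David-5-5/tutorial | python/algo/leecode/algo2430.py | deleteString2
-- ===== SOURCE A (Python) =====
-- from functools import lru_cache
--
-- def deleteString2(s: str) -> int:
--     '''
--     Optimize from deleteString1
--     Modify TYPE of parameter from str to int of recursive method
--     执行通过
--     '''
--     n = len(s)
--     @lru_cache(maxsize = None)
--     def deleteStr(inx:int) -> int: # change substring to inx
--         maxStep = 1
--         if inx == n-1: return 1
--         for l in range(1, (n - inx)// 2+1):
--             if s[inx:inx+l] == s[inx+l:inx+2*l]:
--                 maxStep = max(maxStep, 1 + deleteStr(inx+l))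
--
--         return maxStep
--
--     return deleteStr(0)
-- ===== SOURCE B (Python) =====
-- def deleteString2(s: str) -> int:
--     # Bottom-up DP with a rolling LCP row: row[j] = LCP(s[j:], s[i:]) for the
--     # current i, so each block comparison is O(1) instead of an O(n) slice compare.
--     n = len(s)
--     row = [0] * (n + 1)
--     dp = []  # dp[k] = answer for the suffix starting at i + 1 + k
--     for i in reversed(range(n)):
--         row = [(row[j + 1] + 1 if s[j] == s[i] else 0) for j in range(n)] + [0]
--         best = 1
--         for l in range(1, (n - i) // 2 + 1):
--             if row[i + l] >= l:
--                 best = max(best, dp[l - 1] + 1)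
--         dp = [best] + dp
--     return dp[0] if dp else 0
-- ===== Notes on version B (the rewrite author's own statement) =====
-- stated objective: alternative
-- what changed: Replaced the memoized top-down recursion with O(n) slice comparisons by a bottom-up DP over suffixes that maintains a rolling LCP row, making each adjacent-block equality test an O(1) table lookup.
-- intended difference: On the empty string A returns 1 (its loop never runs and the initial maxStep=1 leaks out) while B returns 0, the intended answer since deleting the empty string takes zero operations. — e.g. on deleteString2(""): A returns 1, B returns 0
import Mathlib
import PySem

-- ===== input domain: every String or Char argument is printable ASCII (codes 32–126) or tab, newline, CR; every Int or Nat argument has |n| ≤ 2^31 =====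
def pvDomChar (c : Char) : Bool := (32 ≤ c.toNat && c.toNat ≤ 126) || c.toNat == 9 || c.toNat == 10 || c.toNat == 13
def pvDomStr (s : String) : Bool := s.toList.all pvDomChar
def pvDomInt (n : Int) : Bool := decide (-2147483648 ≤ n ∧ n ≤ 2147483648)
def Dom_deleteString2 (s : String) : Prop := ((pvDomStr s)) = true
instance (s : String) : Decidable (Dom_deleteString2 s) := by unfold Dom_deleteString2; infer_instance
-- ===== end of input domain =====

-- B replaces A's memoized recursion (O(n) slice compares) by a bottom-up DP with a rolling
-- LCP row (alternative algorithm; not measurably faster in Python at tested sizes).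

-- ===== PORT A =====
-- deleteStr(inx): recursion on the suffix start index (lru_cache dropped: pure function,
-- same values). The recursion is bounded by a structural fuel counter: every recursive
-- call increases inx by l >= 1, so fuel = n (>= n - inx) suffices and the fuel-0 branch is
-- unreachable from deleteString2 (pvDelA_fuel below proves fuel-irrelevance).
-- range(1,(n-inx)//2+1) is List.range' 1 ((n-inx)/2) (all bounds nonnegative);
-- slices via PySem.List.slice.
def pvDelA (cs : List Char) (n : Nat) : Nat → Nat → Int
  | 0, _ => 1
  | fuel + 1, inx =>
    if (inx : Int) = (n : Int) - 1 then 1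
    else
      (List.range' 1 ((n - inx) / 2)).foldl
        (fun maxStep l =>
          if PySem.List.slice cs (some ((inx : Nat) : Int)) (some ((inx + l : Nat) : Int)) =
             PySem.List.slice cs (some ((inx + l : Nat) : Int)) (some ((inx + 2 * l : Nat) : Int))
          then max maxStep (1 + pvDelA cs n fuel (inx + l))
          else maxStep)
        1

def deleteString2 (s : String) : Int := pvDelA s.toList s.toList.length s.toList.length 0

-- ===== PORT B =====
-- one iteration of `for i in reversed(range(n))`: rebuild the LCP row, then the inner
-- l-loop over range(1,(n-i)//2+1); dp[l-1] / row[i+l] are always in range, so getD is exact.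
def pvStepB (cs : List Char) (n : Nat) (st : List Nat × List Int) (i : Nat) :
    List Nat × List Int :=
  let row' := ((List.range n).map (fun j =>
      if cs[j]? = cs[i]? then st.1.getD (j + 1) 0 + 1 else 0)) ++ [0]
  let best := (List.range' 1 ((n - i) / 2)).foldl
      (fun best l => if l ≤ row'.getD (i + l) 0 then max best (st.2.getD (l - 1) 0 + 1) else best) 1
  (row', best :: st.2)

def deleteString2_alt (s : String) : Int :=
  let cs := s.toList
  let n := cs.length
  let res := ((List.range n).reverse).foldl (pvStepB cs n) (List.replicate (n + 1) 0, [])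
  res.2.getD 0 0   -- `dp[0] if dp else 0`

-- ===== PRECONDITION & SPEC =====
-- On the empty string A returns 1 (its loop never runs and the initial maxStep=1 leaks out)
-- while B returns 0, the intended answer: deleting the empty string takes zero operations.
def D_deleteString2 (s : String) : Prop := s = ""
instance (s : String) : Decidable (D_deleteString2 s) := by unfold D_deleteString2; infer_instance

def Spec_deleteString2 (s : String) (out : Int) : Prop := ¬ D_deleteString2 s → out = deleteString2_alt s
instance (s : String) (out : Int) : Decidable (Spec_deleteString2 s out) := by unfold Spec_deleteString2; infer_instance

def pvDiffWitness_deleteString2 : String := ""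
def pvDiffWitnessOut_deleteString2 : Int × Int := (1, 0)

-- ===== CLAIM (what is proved, stated in full; the proofs are below) =====
def Claim_unchanged_deleteString2 : Prop := ∀ (s : String), Dom_deleteString2 s → Spec_deleteString2 s (deleteString2 s)
def Claim_changed_deleteString2 : Prop := Dom_deleteString2 (pvDiffWitness_deleteString2) ∧ D_deleteString2 (pvDiffWitness_deleteString2) ∧ deleteString2 (pvDiffWitness_deleteString2) = pvDiffWitnessOut_deleteString2.1 ∧ deleteString2_alt (pvDiffWitness_deleteString2) = pvDiffWitnessOut_deleteString2.2 ∧ pvDiffWitnessOut_deleteString2.1 ≠ pvDiffWitnessOut_deleteString2.2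
def Claim_exact_deleteString2 : Prop := ∀ (s : String), Dom_deleteString2 s → D_deleteString2 s → deleteString2 s ≠ deleteString2_alt s

-- ===== LEMMAS AND PROOFS =====

-- longest common prefix of two lists
def pvLcp : List Char → List Char → Nat
  | a :: x, b :: y => if a = b then pvLcp x y + 1 else 0
  | _, _ => 0

theorem pvLcp_nil_right (x : List Char) : pvLcp x [] = 0 := by
  cases x <;> rfl

theorem pvLcp_nil_left (y : List Char) : pvLcp [] y = 0 := by
  cases y <;> rfl

theorem pvLcp_cons (a b : Char) (x y : List Char) :
    pvLcp (a :: x) (b :: y) = if a = b then pvLcp x y + 1 else 0 := rfl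

theorem pvLcp_drop (cs : List Char) (i j : Nat) (hi : i < cs.length) (hj : j < cs.length) :
    pvLcp (cs.drop j) (cs.drop i) =
      if cs[j]? = cs[i]? then pvLcp (cs.drop (j + 1)) (cs.drop (i + 1)) + 1 else 0 := by
  rw [List.drop_eq_getElem_cons hi, List.drop_eq_getElem_cons hj, pvLcp_cons]
  simp [hi, hj]

theorem le_pvLcp_iff (l : Nat) (x y : List Char) (hx : l ≤ x.length) (hy : l ≤ y.length) :
    l ≤ pvLcp x y ↔ x.take l = y.take l := by
  induction l generalizing x y with
  | zero => simp
  | succ l ih =>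
    cases x with
    | nil => simp at hx
    | cons a x' =>
      cases y with
      | nil => simp at hy
      | cons b y' =>
        rw [pvLcp_cons, List.take_succ_cons, List.take_succ_cons]
        by_cases hab : a = b
        · subst hab
          rw [if_pos rfl, Nat.add_le_add_iff_right,
            ih x' y' (by simpa using hx) (by simpa using hy)]
          simp
        · rw [if_neg hab]
          simp [hab]

-- row invariant: the LCP row held while processing index i
def pvRow (cs : List Char) (i : Nat) : List Nat :=
  (List.range cs.length).map (fun j => pvLcp (cs.drop j) (cs.drop i)) ++ [0]

theorem pvRow_getD (cs : List Char) (i k : Nat) (hk : k ≤ cs.length) :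
    (pvRow cs i).getD k 0 = pvLcp (cs.drop k) (cs.drop i) := by
  unfold pvRow
  rcases Nat.lt_or_ge k cs.length with h | h
  · rw [List.getD_append _ _ _ _ (by simpa using h)]
    simp [h]
  · have hk' : k = cs.length := le_antisymm hk h
    subst hk'
    rw [List.getD_append_right _ _ _ _ (by simp)]
    simp [List.drop_length, pvLcp_nil_left]

theorem pvRow_length_init (cs : List Char) :
    List.replicate (cs.length + 1) 0 = pvRow cs cs.length := by
  unfold pvRow
  rw [List.replicate_succ' (n := cs.length)]
  congr 1
  simp [List.drop_length, pvLcp_nil_right]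

-- fuel does not matter once it dominates n - inx
theorem pvDelA_high (cs : List Char) (n fuel inx : Nat) (h : n ≤ inx) :
    pvDelA cs n fuel inx = 1 := by
  cases fuel with
  | zero => rfl
  | succ fuel =>
    simp [pvDelA, show (n - inx) / 2 = 0 by omega]

theorem pvDelA_fuel (cs : List Char) (n : Nat) :
    ∀ f f' inx, n - inx ≤ f → n - inx ≤ f' → pvDelA cs n f inx = pvDelA cs n f' inx := by
  intro f
  induction f with
  | zero =>
    intro f' inx h _
    rw [pvDelA_high cs n 0 inx (by omega), pvDelA_high cs n f' inx (by omega)]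
  | succ f ih =>
    intro f' inx h h'
    by_cases hn : n ≤ inx
    · rw [pvDelA_high cs n _ inx hn, pvDelA_high cs n _ inx hn]
    · obtain ⟨g, rfl⟩ : ∃ g, f' = g + 1 := ⟨f' - 1, by omega⟩
      simp only [pvDelA]
      split_ifs with hc
      · rfl
      · apply PySem.List.foldl_congr_mem
        intro acc l hl
        rw [List.mem_range'_1] at hl
        rw [ih g (inx + l) (by omega) (by omega)]

-- the inner l-loop computes pvDelA cs n n i when the row/dp state is correct
theorem pvBest_eq (cs : List Char) (i : Nat) (hi : i < cs.length) :
    (List.range' 1 ((cs.length - i) / 2)).foldl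
      (fun best l => if l ≤ (pvRow cs i).getD (i + l) 0
        then max best (((List.range' (i + 1) (cs.length - (i + 1))).map (pvDelA cs cs.length cs.length)).getD (l - 1) 0 + 1)
        else best) 1
    = pvDelA cs cs.length cs.length i := by
  rw [pvDelA_fuel cs cs.length cs.length ((cs.length - i - 1) + 1) i (by omega) (by omega)]
  simp only [pvDelA]
  by_cases hlast : (i : Int) = (cs.length : Int) - 1
  · have h2 : (cs.length - i) / 2 = 0 := by omega
    simp [hlast, h2]
  · rw [if_neg hlast]
    apply PySem.List.foldl_congr_mem
    intro acc l hl
    rw [List.mem_range'_1] at hl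
    have hl2 : 2 * l ≤ cs.length - i := by omega
    rw [PySem.List.slice_natCast, PySem.List.slice_natCast]
    rw [show i + l - i = l by omega, show i + 2 * l - (i + l) = l by omega]
    rw [pvDelA_fuel cs cs.length (cs.length - i - 1) cs.length (i + l) (by omega) (by omega)]
    have hrow : (pvRow cs i).getD (i + l) 0 = pvLcp (cs.drop (i + l)) (cs.drop i) :=
      pvRow_getD cs i (i + l) (by omega)
    have hiff : (l ≤ (pvRow cs i).getD (i + l) 0) ↔
        ((cs.drop i).take l = (cs.drop (i + l)).take l) := by
      rw [hrow, le_pvLcp_iff l _ _ (by simp; omega) (by simp; omega)]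
      exact eq_comm
    have hdp : ((List.range' (i + 1) (cs.length - (i + 1))).map (pvDelA cs cs.length cs.length)).getD (l - 1) 0
        = pvDelA cs cs.length cs.length (i + l) := by
      have hlen : l - 1 < cs.length - (i + 1) := by omega
      rw [List.getD_eq_getElem _ _ (by simpa using hlen)]
      simp only [List.getElem_map, List.getElem_range']
      congr 1
      omega
    by_cases hg : (cs.drop i).take l = (cs.drop (i + l)).take l
    · rw [if_pos (hiff.mpr hg), if_pos hg, hdp]
      congr 1
      omega
    · rw [if_neg (fun h => hg (hiff.mp h)), if_neg hg]

-- main loop invariant-- main loop invariant, downward over i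
theorem pvLoopInv (cs : List Char) (k i : Nat) (hk : i + k = cs.length) :
    ((List.range' i k).reverse).foldl (pvStepB cs cs.length)
        (List.replicate (cs.length + 1) 0, [])
      = (pvRow cs i, (List.range' i k).map (pvDelA cs cs.length cs.length)) := by
  induction k generalizing i with
  | zero =>
    simp only [List.range', List.reverse_nil, List.foldl_nil, List.map_nil]
    rw [pvRow_length_init]
    have : i = cs.length := by omega
    rw [this]
  | succ k ih =>
    rw [List.range'_succ, List.reverse_cons, List.foldl_append, List.foldl_cons,
      List.foldl_nil, ih (i + 1) (by omega)]
    have hi : i < cs.length := by omega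
    simp only [pvStepB]
    have hrow : (List.map (fun j => if cs[j]? = cs[i]? then (pvRow cs (i + 1)).getD (j + 1) 0 + 1 else 0)
        (List.range cs.length) ++ [0]) = pvRow cs i := by
      have he : ∀ j ∈ List.range cs.length,
          (if cs[j]? = cs[i]? then (pvRow cs (i + 1)).getD (j + 1) 0 + 1 else 0)
            = pvLcp (cs.drop j) (cs.drop i) := by
        intro j hj
        rw [List.mem_range] at hj
        rw [pvRow_getD cs (i + 1) (j + 1) (by omega), ← pvLcp_drop cs i j hi hj]
      rw [List.map_congr_left he, pvRow]
    rw [hrow]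
    have hb := pvBest_eq cs i hi
    rw [show List.range' (i + 1) (cs.length - (i + 1)) = List.range' (i + 1) k by congr 1; omega] at hb
    rw [hb, List.map_cons]

theorem pvAlt_eq (s : String) (hs : s.toList ≠ []) :
    deleteString2_alt s = pvDelA s.toList s.toList.length s.toList.length 0 := by
  have hn : 0 < s.toList.length := List.length_pos_of_ne_nil hs
  simp only [deleteString2_alt]
  rw [List.range_eq_range', pvLoopInv s.toList s.toList.length 0 (by omega)]
  dsimp only
  rw [List.getD_eq_getElem _ _ (by simpa using hn)]
  simp

-- ===== VERDICT (by name: the statement is the Claim_ definition above) =====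
theorem deleteString2_spec : Claim_unchanged_deleteString2 := by
  intro s _ hD
  have hs : s.toList ≠ [] := by
    intro h
    exact hD (by unfold D_deleteString2; simpa using h)
  unfold deleteString2
  exact (pvAlt_eq s hs).symm

theorem deleteString2_changed : Claim_changed_deleteString2 := by
  unfold Claim_changed_deleteString2
  decide

theorem deleteString2_tight : Claim_exact_deleteString2 := by
  intro s _ hD
  unfold D_deleteString2 at hD
  subst hD
  decide
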